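-- pv_equiv track=rewrite | github.com/autojazari/recursions | adjacent_products.py | adjacent_product
-- ===== SOURCE A (Python) =====
-- def multiply(inputArray):
--     m = inputArray[0] * inputArray[1]
--     return m
--
-- def adjacent_product(inputArray):
--     """
--     >>> adjacent_product([1,0,1,0,1000])
--     0
--
--     >>> adjacent_product([-1, 1, -1])
--     -1
--     """
--     # [3, 6, -2, -5, 7, 3]
--     if len(inputArray) <= 1:
--         return []
--
--     left = inputArray[:2]
--     right = inputArray[1:]
--
--     m = multiply(left)
--
--     result = adjacent_product(right)
--
--     # combine solutions
--     result.insert(0, m)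
--
--     return result
-- ===== SOURCE B (Python) =====
-- def adjacent_product(inputArray):
--     result = []
--     for i in range(len(inputArray) - 1):
--         result.append(inputArray[i] * inputArray[i + 1])
--     return result
-- ===== Notes on version B (the rewrite author's own statement) =====
-- stated objective: simpler
-- what changed: Replaced the recursive divide-and-combine (slice, multiply helper, recurse on the tail, insert at position 0) with a single flat indexed loop appending each adjacent product.
import Mathlib
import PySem

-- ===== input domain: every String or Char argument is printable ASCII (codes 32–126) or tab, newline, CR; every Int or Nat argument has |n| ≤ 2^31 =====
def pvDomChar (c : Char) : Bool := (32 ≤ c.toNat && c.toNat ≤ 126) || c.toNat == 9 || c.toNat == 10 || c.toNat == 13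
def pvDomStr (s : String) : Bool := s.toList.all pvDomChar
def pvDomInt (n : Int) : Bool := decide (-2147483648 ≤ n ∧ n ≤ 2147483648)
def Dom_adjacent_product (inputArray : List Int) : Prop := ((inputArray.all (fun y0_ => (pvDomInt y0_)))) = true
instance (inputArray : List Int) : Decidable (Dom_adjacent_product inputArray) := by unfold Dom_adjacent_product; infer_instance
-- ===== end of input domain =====

-- B replaces A's recursive slice/multiply/insert(0) decomposition by one flat indexed loop (simpler).

-- ===== PORT A =====
-- helper 'multiply': inputArray[0] * inputArray[1]; always called with length ≥ 2, defaults unreachable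
def pyMultiply (inputArray : List Int) : Int :=
  (PySem.List.pyGet? inputArray 0).getD 0 * (PySem.List.pyGet? inputArray 1).getD 0

def adjacent_product (inputArray : List Int) : List Int :=
  if inputArray.length ≤ 1 then []
  else
    let left := PySem.List.slice inputArray (some 0) (some 2)
    let right := PySem.List.slice inputArray (some 1) none
    let m := pyMultiply left
    let result := adjacent_product right
    PySem.List.insert result 0 m
termination_by inputArray.length
decreasing_by
  rw [PySem.List.slice_from_one]
  simp only [List.length_tail]
  omega

-- ===== PORT B =====
-- flat loop: for i in range(len(inputArray)-1): result.append(inputArray[i]*inputArray[i+1])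
def adjacent_product_alt (inputArray : List Int) : List Int :=
  (PySem.List.pyRange 0 ((inputArray.length : Int) - 1) 1).foldl
    (fun result i =>
      result ++ [(PySem.List.pyGet? inputArray i).getD 0 * (PySem.List.pyGet? inputArray (i + 1)).getD 0])
    []

-- ===== PRECONDITION & SPEC =====
def Spec_adjacent_product (inputArray : List Int) (out : List Int) : Prop := out = adjacent_product_alt inputArray
instance (inputArray : List Int) (out : List Int) : Decidable (Spec_adjacent_product inputArray out) := by unfold Spec_adjacent_product; infer_instance

-- ===== CLAIM (what is proved, stated in full; the proofs are below) =====
def Claim_equal_adjacent_product : Prop := ∀ (inputArray : List Int), Dom_adjacent_product inputArray → Spec_adjacent_product inputArray (adjacent_product inputArray)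

-- ===== LEMMAS AND PROOFS =====

-- the common reference function: products of adjacent pairs
def pairsRef : List Int → List Int
  | x :: y :: t => x * y :: pairsRef (y :: t)
  | _ => []

theorem alt_eq_map (inputArray : List Int) :
    adjacent_product_alt inputArray =
      (List.range (inputArray.length - 1)).map
        (fun k => inputArray.getD k 0 * inputArray.getD (k + 1) 0) := by
  unfold adjacent_product_alt
  rw [PySem.List.foldl_append_singleton_eq_map, PySem.List.pyRange_one, List.map_map]
  simp only [List.nil_append]
  congr 1
  · funext k
    have h2 : ((k : Nat) : Int) + 1 = ((k + 1 : Nat) : Int) := by push_cast; ring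
    simp only [Function.comp_apply, zero_add]
    rw [h2, PySem.List.pyGet?_natCast, PySem.List.pyGet?_natCast]
    simp [List.getD]
  · congr 1
    omega

theorem map_eq_pairsRef (inputArray : List Int) :
    (List.range (inputArray.length - 1)).map
        (fun k => inputArray.getD k 0 * inputArray.getD (k + 1) 0) = pairsRef inputArray := by
  induction inputArray with
  | nil => simp [pairsRef]
  | cons x t ih =>
    match t with
    | [] => simp [pairsRef]
    | y :: t' =>
      rw [show (x :: y :: t').length - 1 = ((y :: t').length - 1) + 1 by simp,
          List.range_succ_eq_map, List.map_cons, List.map_map, pairsRef]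
      refine List.cons_eq_cons.mpr ⟨rfl, ?_⟩
      rw [← ih]
      rfl

theorem a_eq_pairsRef (inputArray : List Int) :
    adjacent_product inputArray = pairsRef inputArray := by
  induction inputArray with
  | nil => rw [adjacent_product.eq_def]; simp [pairsRef]
  | cons x t ih =>
    match t with
    | [] => rw [adjacent_product.eq_def]; simp [pairsRef]
    | y :: t' =>
      rw [adjacent_product.eq_def]
      simp only [List.length_cons, PySem.List.slice_from_one]
      rw [if_neg (by omega)]
      have hl : PySem.List.slice (x :: y :: t') (some 0) (some 2) = [x, y] := by
        rw [show ((0 : Int)) = ((0 : Nat) : Int) from rfl,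
            show ((2 : Int)) = ((2 : Nat) : Int) from rfl,
            PySem.List.slice_natCast]
        simp
      rw [hl]
      simp only [List.tail_cons] at *
      rw [ih, PySem.List.insert_zero, pairsRef]
      refine List.cons_eq_cons.mpr ⟨?_, rfl⟩
      simp [pyMultiply, PySem.List.pyGet?]
      rfl

-- ===== VERDICT (by name: the statement is the Claim_ definition above) =====
theorem adjacent_product_spec : Claim_equal_adjacent_product := by
  intro inputArray _
  unfold Spec_adjacent_product
  rw [alt_eq_map, map_eq_pairsRef, a_eq_pairsRef]
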